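-- pv_equiv track=rewrite | github.com/topaz1874/pynotes_excercises | longest_name.py | get_longest_name
-- ===== SOURCE A (Python) =====
-- def get_longest_name(a_list):
--     """ Return '******' if the input list is [], [''], or a list containing
--         names of equal length.
--         Else, return the name that is greater in length than any other name
--         in the list.
--
--     >>> get_longest_name(["Candide", "Jessie", "Kath", "Amity", "Raeanne"])
--     >>> '******'
--     >>> get_longest_name(["Jessie", "Kath", "Amity", "Raeanne"])
--     >>> '******'
--     >>> get_longest_name(["Jessie", "Kath", "Amity"])
--     >>> 'Jessie'
--     """
--
--     # your code here
--     l_name = '******'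
--
--     # better solution
--     """
--     max_length = max([len(name) for name in a_list])
--     duplicate_lengths = [name for name in a_list if len(name) == max_length]
--     if not a_list:
--         return l_name
--     if a_list == [''] or len(duplicate_lengths) > 1:
--         return l_name
--     else:
--         return ''.join(duplicate_lengths)
--     return l_name
--     """
--
--     n_list = [(a_list[i], len(a_list[i])) for i in range(len(a_list))]
--     sorted_list = sorted(n_list, key=lambda length:length[1])
--     sorted_list.reverse()
--
--
--     # print sorted_list
--     if sorted_list:
--         max_name_length = sorted_list[0][1]
--         if len(sorted_list) == 1 and max_name_length > 0:
--             return sorted_list[0][0]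
--         elif len(sorted_list) > 1 and max_name_length > sorted_list[1][1]:
--             return sorted_list[0][0]
--         else:
--             return l_name
--     else:
--         return l_name
-- ===== SOURCE B (Python) =====
-- def get_longest_name(a_list):
--     if not a_list:
--         return '******'
--     max_len = max(len(n) for n in a_list)
--     longest = [n for n in a_list if len(n) == max_len]
--     return longest[0] if max_len > 0 and len(longest) == 1 else '******'
-- ===== Notes on version B (the rewrite author's own statement) =====
-- stated objective: simpler
-- what changed: Replaces A's build-(name,len)-pairs / stable-sort-by-length / reverse / inspect-top-two approach with a direct max-scan plus one filter pass and a single condition.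
import Mathlib
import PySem

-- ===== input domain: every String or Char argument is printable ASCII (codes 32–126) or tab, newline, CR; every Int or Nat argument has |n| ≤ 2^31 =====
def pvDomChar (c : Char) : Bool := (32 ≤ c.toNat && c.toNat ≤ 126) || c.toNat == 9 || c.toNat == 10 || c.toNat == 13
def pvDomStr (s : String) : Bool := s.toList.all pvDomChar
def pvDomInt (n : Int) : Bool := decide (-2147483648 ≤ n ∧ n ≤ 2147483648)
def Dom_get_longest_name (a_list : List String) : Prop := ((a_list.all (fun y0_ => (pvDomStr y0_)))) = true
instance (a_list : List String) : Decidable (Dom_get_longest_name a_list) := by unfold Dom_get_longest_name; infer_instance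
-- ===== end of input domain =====

-- B replaces A's build-pairs / stable-sort-by-length / reverse / inspect-top-two with a
-- direct max-scan plus one filter pass (objective: simpler).

-- ===== PORT A =====
def get_longest_name (a_list : List String) : String :=
  let l_name := "******"
  let n_list : List (String × Int) :=
    (PySem.List.pyRange 0 (a_list.length : Int) 1).map
      (fun i => (PySem.List.pyGetD a_list i "", PySem.Str.len (PySem.List.pyGetD a_list i "")))
  let sorted_list := (PySem.List.sorted n_list (fun length => length.2) false).reverse
  match sorted_list with
  | [] => l_name
  | top :: rest =>
    let max_name_length := top.2
    if rest.length = 0 ∧ max_name_length > 0 then top.1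
    else
      match rest with
      | [] => l_name
      | second :: _ => if max_name_length > second.2 then top.1 else l_name

-- ===== PORT B =====
def get_longest_name_alt (a_list : List String) : String :=
  if a_list = [] then "******"
  else
    let max_len := (PySem.List.max? (a_list.map (fun n => PySem.Str.len n)) (fun x => x)).getD 0
    let longest := a_list.filter (fun n => PySem.Str.len n == max_len)
    if max_len > 0 ∧ longest.length = 1 then longest.headD "******" else "******"

-- ===== PRECONDITION & SPEC =====
def Spec_get_longest_name (a_list : List String) (out : String) : Prop := out = get_longest_name_alt a_list
instance (a_list : List String) (out : String) : Decidable (Spec_get_longest_name a_list out) := by unfold Spec_get_longest_name; infer_instance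

-- ===== CLAIM (what is proved, stated in full; the proofs are below) =====
def Claim_equal_get_longest_name : Prop := ∀ (a_list : List String), Dom_get_longest_name a_list → Spec_get_longest_name a_list (get_longest_name a_list)

-- ===== LEMMAS AND PROOFS =====

theorem pv_len_nonneg (s : String) : 0 ≤ PySem.Str.len s := by
  rw [PySem.Str.len_eq]; positivity

theorem pv_nlist_eq (a_list : List String) :
    (PySem.List.pyRange 0 (a_list.length : Int) 1).map
      (fun i => (PySem.List.pyGetD a_list i "", PySem.Str.len (PySem.List.pyGetD a_list i "")))
    = a_list.map (fun s => (s, PySem.Str.len s)) := by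
  have h : (fun i => ((PySem.List.pyGetD a_list i ""), PySem.Str.len (PySem.List.pyGetD a_list i "")))
      = (fun s => (s, PySem.Str.len s)) ∘ (fun j => PySem.List.pyGetD a_list j "") := rfl
  rw [h, ← List.map_map, PySem.List.map_pyGetD_pyRange_zero' a_list ""]

/-- The tail of A's computation, as a function of the reversed sorted list. -/
def pvACore : List (String × Int) → String
  | [] => "******"
  | top :: rest =>
    if rest.length = 0 ∧ top.2 > 0 then top.1
    else
      match rest with
      | [] => "******"
      | second :: _ => if top.2 > second.2 then top.1 else "******"

theorem pv_A_eq (a_list : List String) :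
    get_longest_name a_list
      = pvACore ((PySem.List.sorted (a_list.map (fun s => (s, PySem.Str.len s)))
          (fun p => p.2) false).reverse) := by
  unfold get_longest_name
  rw [pv_nlist_eq]
  show (match (PySem.List.sorted (a_list.map (fun s => (s, PySem.Str.len s)))
          (fun length => length.2) false).reverse with
    | [] => "******"
    | top :: rest =>
      if rest.length = 0 ∧ top.2 > 0 then top.1
      else
        match rest with
        | [] => "******"
        | second :: _ => if top.2 > second.2 then top.1 else "******") = _
  cases (PySem.List.sorted (a_list.map (fun s => (s, PySem.Str.len s))) (fun length => length.2) false).reverse with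
  | nil => rfl
  | cons a t => cases t <;> rfl

theorem pv_B_eq (a_list : List String) (hne : a_list ≠ []) (m : Int)
    (hm : (PySem.List.max? (a_list.map (fun n => PySem.Str.len n)) (fun x => x)).getD 0 = m) :
    get_longest_name_alt a_list
      = if m > 0 ∧ (a_list.filter (fun n => PySem.Str.len n == m)).length = 1
        then (a_list.filter (fun n => PySem.Str.len n == m)).headD "******"
        else "******" := by
  subst hm
  unfold get_longest_name_alt
  rw [if_neg hne]

theorem pv_main (a_list : List String) (T : List (String × Int))
    (hperm : T.Perm (a_list.map (fun s => (s, PySem.Str.len s))))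
    (hpair : T.Pairwise (fun a b => b.2 ≤ a.2)) :
    pvACore T = get_longest_name_alt a_list := by
  cases hTc : T with
  | nil =>
    subst hTc
    have h1 : a_list = [] := List.map_eq_nil_iff.mp hperm.symm.eq_nil
    subst h1; rfl
  | cons top rest =>
    subst hTc
    have hne : a_list ≠ [] := by
      intro h; subst h; simp at hperm
    have htopmem : top ∈ a_list.map (fun s => (s, PySem.Str.len s)) :=
      hperm.mem_iff.mp List.mem_cons_self
    obtain ⟨s0, hs0, hfs0⟩ := List.mem_map.mp htopmem
    have hmax : ∀ p ∈ a_list.map (fun s => (s, PySem.Str.len s)), p.2 ≤ top.2 := by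
      intro p hp
      rcases List.mem_cons.mp (hperm.mem_iff.mpr hp) with h | h
      · rw [h]
      · exact List.rel_of_pairwise_cons hpair h
    have hmemlen : top.2 ∈ a_list.map (fun n => PySem.Str.len n) := by
      refine List.mem_map.mpr ⟨s0, hs0, ?_⟩
      rw [← hfs0]
    have hmaxeq : (PySem.List.max? (a_list.map (fun n => PySem.Str.len n)) (fun x => x)).getD 0 = top.2 := by
      cases hmx : PySem.List.max? (a_list.map (fun n => PySem.Str.len n)) (fun x => x) with
      | none =>
        rw [PySem.List.max?_eq_none_iff] at hmx
        exact absurd (List.map_eq_nil_iff.mp hmx) hne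
      | some v =>
        have hv2 := PySem.List.max?_isMax hmx
        obtain ⟨s1, hs1, hvs1⟩ := List.mem_map.mp (PySem.List.max?_mem hmx)
        have hvle : v ≤ top.2 := by
          rw [← hvs1]
          exact hmax (s1, PySem.Str.len s1) (List.mem_map.mpr ⟨s1, hs1, rfl⟩)
        have hlev : top.2 ≤ v := hv2 _ hmemlen
        simp [le_antisymm hvle hlev]
    have hfiltmap : (a_list.map (fun s => (s, PySem.Str.len s))).filter (fun p => p.2 == top.2)
        = (a_list.filter (fun n => PySem.Str.len n == top.2)).map (fun s => (s, PySem.Str.len s)) := by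
      rw [List.filter_map]; rfl
    rw [pv_B_eq a_list hne top.2 hmaxeq]
    cases rest with
    | nil =>
      -- a_list is a singleton
      have hsing : a_list.map (fun s => (s, PySem.Str.len s)) = [top] :=
        List.perm_singleton.mp hperm.symm
      obtain ⟨x, rfl⟩ : ∃ x, a_list = [x] := by
        cases a_list with
        | nil => exact absurd rfl hne
        | cons y ys =>
          cases ys with
          | nil => exact ⟨y, rfl⟩
          | cons z zs => simp at hsing
      have hx : (x, PySem.Str.len x) = top := by simpa using hsing
      subst hx
      simp [pvACore]
    | cons r rs =>
      have hfiltperm : (((top :: r :: rs)).filter (fun p : String × Int => p.2 == top.2)).Perm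
          ((a_list.filter (fun n => PySem.Str.len n == top.2)).map (fun s => (s, PySem.Str.len s))) := by
        rw [← hfiltmap]; exact hperm.filter _
      have hrmem : r ∈ a_list.map (fun s => (s, PySem.Str.len s)) :=
        hperm.mem_iff.mp (by simp)
      have hr0 : 0 ≤ r.2 := by
        obtain ⟨s2, _, hfs2⟩ := List.mem_map.mp hrmem
        rw [← hfs2]; exact pv_len_nonneg s2
      by_cases hgt : r.2 < top.2
      · -- unique longest: the filter keeps exactly the top element
        have hrestnil : (r :: rs).filter (fun p : String × Int => p.2 == top.2) = [] := by
          rw [List.filter_eq_nil_iff]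
          intro x hx
          rcases List.mem_cons.mp hx with h | h
          · subst h; simp; omega
          · have : x.2 ≤ r.2 := List.rel_of_pairwise_cons (List.Pairwise.sublist (by simp) hpair) h
            simp; omega
        have hTfilt : ((top :: r :: rs)).filter (fun p : String × Int => p.2 == top.2) = [top] := by
          rw [List.filter_cons_of_pos (by simp), hrestnil]
        rw [hTfilt] at hfiltperm
        have hmapone : (a_list.filter (fun n => PySem.Str.len n == top.2)).map (fun s => (s, PySem.Str.len s)) = [top] :=
          (List.perm_singleton.mp hfiltperm.symm)
        obtain ⟨s3, hs3, hfone⟩ : ∃ s, a_list.filter (fun n => PySem.Str.len n == top.2) = [s] ∧ (s, PySem.Str.len s) = top := by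
          cases hl : a_list.filter (fun n => PySem.Str.len n == top.2) with
          | nil => rw [hl] at hmapone; simp at hmapone
          | cons x xs =>
            rw [hl] at hmapone
            cases xs with
            | nil => exact ⟨x, rfl, by simpa using hmapone⟩
            | cons y ys => simp at hmapone
        have hm0 : 0 < top.2 := lt_of_le_of_lt hr0 hgt
        have hLHS : pvACore (top :: r :: rs) = top.1 := by
          simp [pvACore, hgt]
        have hlen1 : (a_list.filter (fun n => PySem.Str.len n == top.2)).length = 1 := by
          rw [hs3]; rfl
        rw [hLHS, if_pos ⟨hm0, hlen1⟩, hs3]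
        have hs3top : s3 = top.1 := by rw [← hfone]
        simp [hs3top]
      · -- tie for the longest length: filter keeps at least two elements
        have hrm : r.2 = top.2 := le_antisymm (hmax r hrmem) (not_lt.mp hgt)
        have hTfilt2 : ((top :: r :: rs)).filter (fun p : String × Int => p.2 == top.2)
            = top :: r :: (rs.filter (fun p : String × Int => p.2 == top.2)) := by
          rw [List.filter_cons_of_pos (by simp), List.filter_cons_of_pos (by simp [hrm])]
        have hlen := hfiltperm.length_eq
        rw [hTfilt2, List.length_map] at hlen
        simp only [List.length_cons] at hlen
        have hnot1 : ¬ ((a_list.filter (fun n => PySem.Str.len n == top.2)).length = 1) := by omega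
        have hLHS : pvACore (top :: r :: rs) = "******" := by
          simp [pvACore, hrm]
        rw [hLHS, if_neg (by intro h; exact hnot1 h.2)]

-- ===== VERDICT (by name: the statement is the Claim_ definition above) =====
theorem get_longest_name_spec : Claim_equal_get_longest_name := by
  intro a_list _
  unfold Spec_get_longest_name
  rw [pv_A_eq]
  exact pv_main a_list _ ((List.reverse_perm _).trans (PySem.List.sorted_perm _ _ _))
    (by rw [List.pairwise_reverse]; exact PySem.List.sorted_pairwise _ _)
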